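-- pv_equiv track=rewrite | github.com/ksuglobov/mmf_practicum_fall_2021 | contest_1/check_first_sentence_is_second.py | check_first_sentence_is_second
-- ===== SOURCE A (Python) =====
-- def check_first_sentence_is_second(str1, str2):
--     d1 = {}
--     list1 = str1.split(' ')
--     for i in list1:
--         if i in d1:
--             d1[i] += 1
--         else:
--             d1[i] = 1
--     d2 = {}
--     list2 = str2.split(' ')
--     for i in list2:
--         if i in d2:
--             d2[i] += 1
--         else:
--             d2[i] = 1
--     d1[''] = 1
--     d2[''] = 1
--
--     for i in d2.keys():
--         if not (i in d1) or d2[i] > d1[i]: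
--             return False
--     return True
-- ===== SOURCE B (Python) =====
-- def check_first_sentence_is_second(str1, str2):
--     pool = str1.split(' ')
--     for w in str2.split(' '):
--         if w == '':
--             continue
--         try:
--             pool.remove(w)
--         except ValueError:
--             return False
--     return True
-- ===== Notes on version B (the rewrite author's own statement) =====
-- stated objective: alternative
-- what changed: B builds no frequency tables at all: it keeps str1's word list as a shrinking pool and consumes one occurrence per non-empty word of str2 via list.remove, failing when removal raises; empty tokens are skipped (A's d['']=1 override neutralises them).
import Mathlib
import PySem

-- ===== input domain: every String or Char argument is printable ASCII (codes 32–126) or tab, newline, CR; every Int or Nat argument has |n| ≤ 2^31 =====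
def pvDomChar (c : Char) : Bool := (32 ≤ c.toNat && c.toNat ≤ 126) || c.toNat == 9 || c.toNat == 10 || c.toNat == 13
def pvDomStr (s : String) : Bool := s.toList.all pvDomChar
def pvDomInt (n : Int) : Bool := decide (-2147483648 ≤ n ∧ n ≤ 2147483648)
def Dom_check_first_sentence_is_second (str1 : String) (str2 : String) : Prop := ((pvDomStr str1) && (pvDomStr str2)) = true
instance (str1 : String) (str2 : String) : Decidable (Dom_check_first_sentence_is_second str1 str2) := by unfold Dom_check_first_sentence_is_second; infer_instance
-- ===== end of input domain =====

-- B builds no frequency tables: it consumes a shrinking pool of str1's words, removing one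
-- occurrence per non-empty word of str2 (empty tokens skipped, as A's d['']=1 override
-- neutralises them). Alternative algorithm, not faster.


-- ===== PORT A =====
-- 'for i in d2.keys(): if not (i in d1) or d2[i] > d1[i]: return False / return True'
-- (d2[i] / d1[i] are looked up via getD 0; every i iterated is a key of d2, and d1[i]
-- is only reached when 'i in d1', so the default is never observed)
def aKeyLoop (d1 d2 : PySem.Dict String Int) : List String → Bool
  | [] => true
  | i :: rest =>
      if !(d1.contains i) || decide (d1.getD i 0 < d2.getD i 0) then false
      else aKeyLoop d1 d2 rest

def check_first_sentence_is_second (str1 : String) (str2 : String) : Bool :=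
  let list1 := (PySem.Str.split? str1 " ").getD []
  let d1 := list1.foldl
    (fun d i => if d.contains i then d.insert i (d.getD i 0 + 1) else d.insert i 1)
    PySem.Dict.empty
  let list2 := (PySem.Str.split? str2 " ").getD []
  let d2 := list2.foldl
    (fun d i => if d.contains i then d.insert i (d.getD i 0 + 1) else d.insert i 1)
    PySem.Dict.empty
  let d1 := d1.insert "" 1
  let d2 := d2.insert "" 1
  aKeyLoop d1 d2 d2.keys

-- ===== PORT B =====
-- 'for w in str2.split(' '): skip '' ; pool.remove(w) or return False / return True'
-- (pool.remove raising ValueError = PySem.List.remove? returning none)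
def bLoop (pool : List String) : List String → Bool
  | [] => true
  | w :: rest =>
      if w == "" then bLoop pool rest
      else
        match PySem.List.remove? pool w with
        | none => false
        | some pool' => bLoop pool' rest

def check_first_sentence_is_second_alt (str1 : String) (str2 : String) : Bool :=
  let pool := (PySem.Str.split? str1 " ").getD []
  bLoop pool ((PySem.Str.split? str2 " ").getD [])

-- ===== PRECONDITION & SPEC =====
def Spec_check_first_sentence_is_second (str1 : String) (str2 : String) (out : Bool) : Prop := out = check_first_sentence_is_second_alt str1 str2
instance (str1 : String) (str2 : String) (out : Bool) : Decidable (Spec_check_first_sentence_is_second str1 str2 out) := by unfold Spec_check_first_sentence_is_second; infer_instance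

-- ===== CLAIM (what is proved, stated in full; the proofs are below) =====
def Claim_equal_check_first_sentence_is_second : Prop := ∀ (str1 : String) (str2 : String), Dom_check_first_sentence_is_second str1 str2 → Spec_check_first_sentence_is_second str1 str2 (check_first_sentence_is_second str1 str2)

-- ===== LEMMAS AND PROOFS =====

-- A's counting loop is collections.Counter
theorem foldA_eq_counter (l : List String) :
    l.foldl (fun d i => if d.contains i then d.insert i (d.getD i 0 + 1) else d.insert i 1)
      PySem.Dict.empty = PySem.Dict.counter l := by
  rw [← PySem.Dict.foldl_insert_getD_add_one_eq_counter]
  apply PySem.List.foldl_congr_mem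
  intro d i _
  cases h : d.contains i with
  | false => rw [PySem.Dict.getD_of_not_contains d 0 h]; simp
  | true => simp

-- A's early-return key loop is a negated 'any'
theorem aKeyLoop_eq_any (d1 d2 : PySem.Dict String Int) (l : List String) :
    aKeyLoop d1 d2 l
      = !(l.any fun i => !(d1.contains i) || decide (d1.getD i 0 < d2.getD i 0)) := by
  induction l with
  | nil => rfl
  | cons i rest ih =>
      cases h : (!(d1.contains i) || decide (d1.getD i 0 < d2.getD i 0)) with
      | true => simp only [aKeyLoop, h, if_true, List.any_cons, Bool.true_or, Bool.not_true]
      | false =>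
          simp only [aKeyLoop, h, Bool.false_eq_true, if_false, List.any_cons, Bool.false_or]
          exact ih

-- characterisation of A's key scan: containment of per-word counts for non-empty words
theorem A_iff (l1 l2 : List String) :
    aKeyLoop ((PySem.Dict.counter l1).insert "" 1) ((PySem.Dict.counter l2).insert "" 1)
        ((PySem.Dict.counter l2).insert "" 1).keys = true
      ↔ ∀ w, w ≠ "" → l2.count w ≤ l1.count w := by
  have hbad : ∀ w ∈ PySem.Set.ofList l2,
      (!(((PySem.Dict.counter l1).insert "" 1).contains w)
        || decide ((((PySem.Dict.counter l1).insert "" 1).getD w 0)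
              < (((PySem.Dict.counter l2).insert "" 1).getD w 0)))
      = !(w == "" || decide (l2.count w ≤ l1.count w)) := by
    intro w hw
    rw [PySem.Set.mem_ofList] at hw
    by_cases hweq : w = ""
    · subst hweq
      simp [PySem.Dict.contains_insert_self, PySem.Dict.getD_insert_self]
    · rw [PySem.Dict.contains_insert, PySem.Dict.getD_insert_of_ne _ _ _ hweq,
          PySem.Dict.getD_insert_of_ne _ _ _ hweq, PySem.Dict.getD_counter,
          PySem.Dict.getD_counter, PySem.Dict.contains_counter]
      have hne : (w == "") = false := by simp [hweq]
      rw [hne]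
      simp only [Bool.false_or]
      by_cases hmem : w ∈ l1
      · have : l1.contains w = true := by simpa using hmem
        rw [this]
        simp only [Bool.not_true, Bool.false_or]
        have : ((l1.count w : Int) < (l2.count w : Int)) ↔ ¬ (l2.count w ≤ l1.count w) := by
          constructor <;> intro h <;> [omega; (exact_mod_cast Nat.lt_of_not_le (by omega))]
        simp only [this]
        rw [← decide_not, decide_eq_decide]
      · have h1 : l1.contains w = false := by simpa using hmem
        have hc1 : l1.count w = 0 := List.count_eq_zero.mpr hmem
        have hc2 : 0 < l2.count w := List.count_pos_iff.mpr hw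
        rw [h1]
        simp only [Bool.not_false, Bool.true_or]
        have : ¬ (l2.count w ≤ l1.count w) := by omega
        simp [this]
  have hbadEmpty :
      (!(((PySem.Dict.counter l1).insert "" 1).contains "")
        || decide ((((PySem.Dict.counter l1).insert "" 1).getD "" 0)
              < (((PySem.Dict.counter l2).insert "" 1).getD "" 0))) = false := by
    simp [PySem.Dict.contains_insert_self, PySem.Dict.getD_insert_self]
  have hset : aKeyLoop ((PySem.Dict.counter l1).insert "" 1) ((PySem.Dict.counter l2).insert "" 1)
        ((PySem.Dict.counter l2).insert "" 1).keys
      = (PySem.Set.ofList l2).all (fun w => w == "" || decide (l2.count w ≤ l1.count w)) := by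
    rw [aKeyLoop_eq_any, List.all_eq_not_any_not]
    by_cases hc : (PySem.Dict.counter l2).contains "" = true
    · rw [PySem.Dict.keys_insert_of_contains _ _ hc, PySem.Dict.keys_counter,
          PySem.List.any_congr_mem hbad]
    · rw [PySem.Dict.keys_insert_of_not_contains _ _ (by simpa using hc),
          PySem.Dict.keys_counter, List.any_append]
      simp only [List.any_cons, List.any_nil, hbadEmpty, Bool.or_false]
      rw [PySem.List.any_congr_mem hbad]
  rw [hset, List.all_eq_true]
  constructor
  · intro h w hw
    by_cases hmem : w ∈ l2
    · have := h w (by rw [PySem.Set.mem_ofList]; exact hmem)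
      simp only [Bool.or_eq_true, beq_iff_eq, decide_eq_true_eq] at this
      rcases this with h' | h'
      · exact absurd h' hw
      · exact h'
    · simp [List.count_eq_zero.mpr hmem]
  · intro h w hw
    rw [PySem.Set.mem_ofList] at hw
    by_cases hweq : w = ""
    · simp [hweq]
    · simp [h w hweq]

-- characterisation of B's consuming loop
theorem bLoop_iff (l2 : List String) : ∀ pool,
    bLoop pool l2 = true ↔ ∀ w, w ≠ "" → l2.count w ≤ pool.count w := by
  induction l2 with
  | nil => intro pool; simp [bLoop]
  | cons w rest ih =>
      intro pool
      by_cases hweq : w = ""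
      · subst hweq
        simp only [bLoop, beq_self_eq_true, if_true]
        rw [ih pool]
        constructor
        · intro h v hv
          rw [List.count_cons_of_ne (Ne.symm hv)]
          exact h v hv
        · intro h v hv
          have := h v hv
          rwa [List.count_cons_of_ne (Ne.symm hv)] at this
      · have hne : (w == "") = false := by simp [hweq]
        simp only [bLoop, hne, Bool.false_eq_true, if_false]
        by_cases hmem : w ∈ pool
        · rw [PySem.List.remove?_eq_some_erase _ _ hmem]
          simp only []
          rw [ih (pool.erase w)]
          have hcw : (pool.erase w).count w = pool.count w - 1 := List.count_erase_self ..
          have hpos : 0 < pool.count w := List.count_pos_iff.mpr hmem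
          constructor
          · intro h v hv
            have := h v hv
            by_cases hvw : v = w
            · subst hvw
              rw [List.count_cons_self]
              rw [hcw] at this
              omega
            · rw [List.count_cons_of_ne (Ne.symm hvw)]
              rwa [List.count_erase_of_ne hvw] at this
          · intro h v hv
            by_cases hvw : v = w
            · subst hvw
              have := h v hv
              rw [List.count_cons_self] at this
              rw [hcw]
              omega
            · rw [List.count_erase_of_ne hvw]
              have := h v hv
              rwa [List.count_cons_of_ne (Ne.symm hvw)] at this
        · rw [(PySem.List.remove?_eq_none_iff pool w).mpr hmem]
          simp only [Bool.false_eq_true, false_iff]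
          intro h
          have := h w hweq
          rw [List.count_cons_self, List.count_eq_zero.mpr hmem] at this
          omega

-- ===== VERDICT (by name: the statement is the Claim_ definition above) =====
theorem check_first_sentence_is_second_spec : Claim_equal_check_first_sentence_is_second := by
  intro str1 str2 _
  unfold Spec_check_first_sentence_is_second
  unfold check_first_sentence_is_second check_first_sentence_is_second_alt
  simp only [foldA_eq_counter]
  rw [Bool.eq_iff_iff, A_iff, bLoop_iff]
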